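-- pv_equiv track=rewrite | github.com/TanZunsheng/PENCI | penci/data/dataset.py | _truncate_file_blocks
-- ===== SOURCE A (Python) =====
-- from typing import Dict, Iterator, List, Optional, Tuple, Any
--
-- def _truncate_file_blocks(
--     file_blocks: List[List[List[int]]],
--     target_batches: int,
-- ) -> List[List[List[int]]]:
--     """按 batch 数裁剪文件块列表，尽量保留整块连续消费。"""
--     if target_batches <= 0:
--         return []
--
--     kept_blocks: List[List[List[int]]] = []
--     remaining = target_batches
--     for block in file_blocks:
--         if remaining <= 0:
--             break
--         if len(block) <= remaining:
--             kept_blocks.append(block)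
--             remaining -= len(block)
--             continue
--         kept_blocks.append(block[:remaining])
--         remaining = 0
--         break
--     return kept_blocks
-- ===== SOURCE B (Python) =====
-- from itertools import accumulate
-- from bisect import bisect_left
-- from typing import List
--
--
-- def _truncate_file_blocks(
--     file_blocks: List[List[List[int]]],
--     target_batches: int,
-- ) -> List[List[List[int]]]:
--     if target_batches <= 0:
--         return []
--     cums = list(accumulate(len(b) for b in file_blocks))
--     i = bisect_left(cums, target_batches)
--     if i == len(cums):
--         return list(file_blocks)
--     prefix_before = cums[i - 1] if i else 0
--     return file_blocks[:i] + [file_blocks[i][:target_batches - prefix_before]]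
-- ===== Notes on version B (the rewrite author's own statement) =====
-- stated objective: alternative
-- what changed: Replaces the incremental accumulate-and-append loop with a prefix-sum table of block lengths plus a bisect_left search for the first cumulative length reaching the target, then one slice-and-concatenate.
import Mathlib
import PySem

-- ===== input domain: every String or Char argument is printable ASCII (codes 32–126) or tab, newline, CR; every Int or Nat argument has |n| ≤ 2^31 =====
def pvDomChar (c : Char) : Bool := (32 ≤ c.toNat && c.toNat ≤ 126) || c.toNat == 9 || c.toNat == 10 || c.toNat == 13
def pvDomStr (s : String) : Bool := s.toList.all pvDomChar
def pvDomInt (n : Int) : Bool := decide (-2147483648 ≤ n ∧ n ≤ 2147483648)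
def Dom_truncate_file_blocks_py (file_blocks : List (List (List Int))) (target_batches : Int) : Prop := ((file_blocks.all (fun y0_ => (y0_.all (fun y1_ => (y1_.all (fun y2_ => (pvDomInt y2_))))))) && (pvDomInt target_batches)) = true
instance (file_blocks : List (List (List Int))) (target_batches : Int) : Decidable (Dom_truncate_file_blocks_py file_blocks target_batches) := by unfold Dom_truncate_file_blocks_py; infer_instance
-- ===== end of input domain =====

-- B replaces A's incremental accumulate-and-append loop by a prefix-sum table plus a
-- bisect-style first-index search and one slice-and-concatenate (objective: alternative decomposition).

-- ===== PORT A =====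
-- the 'for block in file_blocks' loop with the running 'remaining' counter
def pvTruncLoopA : List (List (List Int)) → Int → List (List (List Int))
  | [], _ => []
  | block :: rest, remaining =>
    if remaining ≤ 0 then []
    else if (block.length : Int) ≤ remaining then
      block :: pvTruncLoopA rest (remaining - block.length)
    else
      [PySem.List.slice block none (some remaining)]   -- block[:remaining], then break

def truncate_file_blocks_py (file_blocks : List (List (List Int))) (target_batches : Int) : List (List (List Int)) :=
  if target_batches ≤ 0 then [] else pvTruncLoopA file_blocks target_batches

-- ===== PORT B =====
-- list(accumulate(len(b) for b in file_blocks)): running sums with accumulator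
def pvRunSums : List Int → Int → List Int
  | [], _ => []
  | x :: xs, acc => (acc + x) :: pvRunSums xs (acc + x)

-- body after the target_batches <= 0 guard of Source B
def pvAltBody (file_blocks : List (List (List Int))) (target_batches : Int) : List (List (List Int)) :=
  let cums := pvRunSums (file_blocks.map (fun b => (b.length : Int))) 0
  -- bisect_left(cums, t) on the sorted prefix-sum list = first index with t ≤ cums[i] (length if none)
  let i := cums.findIdx (fun c => decide (target_batches ≤ c))
  if i = cums.length then file_blocks
  else
    let prefix_before : Int := if i = 0 then 0 else cums.getD (i - 1) 0
    file_blocks.take i ++ [PySem.List.slice (file_blocks.getD i []) none (some (target_batches - prefix_before))]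

def truncate_file_blocks_py_alt (file_blocks : List (List (List Int))) (target_batches : Int) : List (List (List Int)) :=
  if target_batches ≤ 0 then [] else pvAltBody file_blocks target_batches

-- ===== PRECONDITION & SPEC =====
def Spec_truncate_file_blocks_py (file_blocks : List (List (List Int))) (target_batches : Int) (out : List (List (List Int))) : Prop := out = truncate_file_blocks_py_alt file_blocks target_batches
instance (file_blocks : List (List (List Int))) (target_batches : Int) (out : List (List (List Int))) : Decidable (Spec_truncate_file_blocks_py file_blocks target_batches out) := by unfold Spec_truncate_file_blocks_py; infer_instance

-- ===== CLAIM (what is proved, stated in full; the proofs are below) =====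
def Claim_equal_truncate_file_blocks_py : Prop := ∀ (file_blocks : List (List (List Int))) (target_batches : Int), Dom_truncate_file_blocks_py file_blocks target_batches → Spec_truncate_file_blocks_py file_blocks target_batches (truncate_file_blocks_py file_blocks target_batches)

-- ===== LEMMAS AND PROOFS =====

theorem pvRunSums_shift (xs : List Int) (acc : Int) :
    pvRunSums xs acc = (pvRunSums xs 0).map (fun c => acc + c) := by
  induction xs generalizing acc with
  | nil => simp [pvRunSums]
  | cons x xs ih =>
    simp only [pvRunSums, zero_add, List.map_cons]
    rw [ih (acc + x), ih x, List.map_map]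
    congr 1
    refine List.map_congr_left fun c _ => ?_
    simp only [Function.comp_apply]
    ring

theorem pvKey (fb : List (List (List Int))) (t : Int) (ht : 0 < t) :
    pvTruncLoopA fb t = pvAltBody fb t := by
  induction fb generalizing t with
  | nil => simp [pvTruncLoopA, pvAltBody, pvRunSums]
  | cons b rest ih =>
    simp only [pvTruncLoopA, pvAltBody, List.map_cons, pvRunSums, zero_add]
    rw [if_neg (show ¬ t ≤ 0 by omega), List.findIdx_cons]
    by_cases hle : t ≤ (b.length : Int)
    · -- the first block already reaches the target: i = 0
      simp only [hle, decide_true, cond_true]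
      rw [if_neg (show ¬ (0 = (_ :: _ : List Int).length) by simp)]
      simp only [List.take_zero, List.nil_append, List.getD, List.getElem?_cons_zero,
        Option.getD_some, if_true, sub_zero]
      by_cases hge : (b.length : Int) ≤ t
      · -- exact fit: A keeps the whole block, then the loop stops
        rw [if_pos hge]
        have heq : t = (b.length : Int) := le_antisymm hle hge
        have h0 : pvTruncLoopA rest (t - (b.length : Int)) = [] := by
          cases rest with
          | nil => rfl
          | cons r rs => simp only [pvTruncLoopA]; rw [if_pos (by omega)]
        rw [h0, PySem.List.slice_to _ (by omega), heq]
        simp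
      · rw [if_neg hge]
    · -- the first block is consumed whole and the target is not yet reached: i = j + 1
      have hlt : (b.length : Int) < t := by omega
      simp only [show decide (t ≤ (b.length : Int)) = false by simp [hle], cond_false]
      rw [if_pos (le_of_lt hlt), ih _ (by omega)]
      simp only [pvAltBody]
      rw [pvRunSums_shift _ ((b.length : Int)), List.findIdx_map]
      set base := pvRunSums (rest.map (fun b => ((b.length : Int)))) 0 with hbase
      have hpred : ((fun c => decide (t ≤ c)) ∘ (fun c => (b.length : Int) + c))
          = (fun c => decide (t - (b.length : Int) ≤ c)) := by
        funext c; simp only [Function.comp]; rw [decide_eq_decide]; omega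
      rw [hpred]
      set j := base.findIdx (fun c => decide (t - (b.length : Int) ≤ c)) with hj
      clear_value j
      have hjle : j ≤ base.length := hj ▸ List.findIdx_le_length
      by_cases hend : j = base.length
      · rw [if_pos (by simp [hend]), if_pos (by simp [hend])]
      · have hjlt : j < base.length := lt_of_le_of_ne hjle hend
        rw [if_neg hend]
        rw [if_neg (show ¬ (j + 1 = ((b.length : Int) :: (base.map (fun c => (b.length : Int) + c))).length) by simp only [List.length_cons, List.length_map]; omega)]
        have hget : (b :: rest).getD (j + 1) ([] : List (List Int)) = rest.getD j [] := by
          simp [List.getD]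
        have hpb : ((b.length : Int) :: (base.map (fun c => (b.length : Int) + c))).getD (j + 1 - 1) 0
            = (b.length : Int) + (if j = 0 then 0 else base.getD (j - 1) 0) := by
          by_cases hj0 : j = 0
          · subst hj0; simp [List.getD]
          · rw [if_neg hj0]
            obtain ⟨k, hk⟩ : ∃ k, j = k + 1 := ⟨j - 1, by omega⟩
            subst hk
            have hkin : k < base.length := by omega
            simp [List.getD, List.getElem?_cons_succ,
              List.getElem?_eq_getElem hkin]
        rw [if_neg (Nat.succ_ne_zero j)]
        simp only [List.take_succ_cons, List.cons_append, hget, hpb]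
        have harith : t - ((b.length : Int) + (if j = 0 then 0 else base.getD (j - 1) 0))
            = t - (b.length : Int) - (if j = 0 then 0 else base.getD (j - 1) 0) := by ring
        rw [harith]

-- ===== VERDICT (by name: the statement is the Claim_ definition above) =====
theorem truncate_file_blocks_py_spec : Claim_equal_truncate_file_blocks_py := by
  intro fb t _
  unfold Spec_truncate_file_blocks_py truncate_file_blocks_py truncate_file_blocks_py_alt
  by_cases h : t ≤ 0
  · simp [h]
  · simp only [if_neg h]
    exact pvKey fb t (by omega)
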